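-- pv_equiv track=rewrite | github.com/broadinstitute/bioshop | bishop/bishop/ann/iters.py | batcher
-- ===== SOURCE A (Python) =====
-- def batcher(itr=None, batch_size=None, include_skips=False):
--     batch = []
--     for row in itr:
--         if not include_skips and 'skip' in row:
--             continue
--         batch.append(row)
--         if len(batch) >= batch_size:
--             yield batch
--             batch = []
--     if len(batch):
--         yield batch
-- ===== SOURCE B (Python) =====
-- def batcher(itr=None, batch_size=None, include_skips=False):
--     rows = [row for row in itr if include_skips or 'skip' not in row]
--     size = max(batch_size, 1)
--     while rows:
--         yield rows[:size]
--         rows = rows[size:]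
-- ===== Notes on version B (the rewrite author's own statement) =====
-- stated objective: idiomatic
-- what changed: B separates the two concerns: it first builds the filtered row list in one comprehension, then chunks it by repeated slicing, instead of A's single loop with a manual accumulator and length check; batch sizes below 1 (where A emits singleton batches) collapse to slice size 1 via max(batch_size, 1).
import Mathlib
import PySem

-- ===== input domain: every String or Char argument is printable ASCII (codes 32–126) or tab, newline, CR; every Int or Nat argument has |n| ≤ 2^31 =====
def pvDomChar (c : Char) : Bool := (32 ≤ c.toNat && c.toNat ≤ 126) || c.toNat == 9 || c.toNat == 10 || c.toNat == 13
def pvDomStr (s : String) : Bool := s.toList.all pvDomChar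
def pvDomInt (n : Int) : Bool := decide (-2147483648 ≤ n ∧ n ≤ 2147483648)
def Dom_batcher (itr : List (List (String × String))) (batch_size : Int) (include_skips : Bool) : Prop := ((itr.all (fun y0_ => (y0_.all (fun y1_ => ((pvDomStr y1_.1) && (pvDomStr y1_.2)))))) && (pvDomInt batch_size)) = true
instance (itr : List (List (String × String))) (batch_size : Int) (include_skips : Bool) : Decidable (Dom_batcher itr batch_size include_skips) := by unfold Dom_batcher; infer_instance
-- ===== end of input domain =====

-- B filters the rows first and then chunks the filtered list by repeated slicing,
-- instead of A's single loop with a manual accumulator (idiomatic decomposition; same cost).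


-- ===== PORT A =====
-- `'skip' in row` on a Python dict tests the KEYS; rows arrive as association lists,
-- so the test is "some pair has first component 'skip'".
def pvHasSkip (row : List (String × String)) : Bool := row.any (fun p => p.1 == "skip")

def batcher (itr : List (List (String × String))) (batch_size : Int) (include_skips : Bool) : List (List (List (String × String))) :=
  let st := itr.foldl
    (fun (st : List (List (String × String)) × List (List (List (String × String)))) row =>
      if !include_skips && pvHasSkip row then st
      else
        let batch := st.1 ++ [row]
        if (batch.length : Int) ≥ batch_size then ([], st.2 ++ [batch])
        else (batch, st.2))
    ([], [])
  if st.1.length ≠ 0 then st.2 ++ [st.1] else st.2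

-- ===== PORT B =====
-- Source B's while-loop `yield rows[:size]; rows = rows[size:]` with size = max(batch_size, 1) ≥ 1;
-- the positive slice size is carried as m+1 (m = size-1) so the recursion is visibly terminating;
-- rows[:k] / rows[k:] for 0 ≤ k are exactly List.take / List.drop.
def pvChunks (m : Nat) (rows : List (List (String × String))) : List (List (List (String × String))) :=
  match rows with
  | [] => []
  | r :: rest => ((r :: rest).take (m + 1)) :: pvChunks m ((r :: rest).drop (m + 1))
termination_by rows.length
decreasing_by simp

def batcher_alt (itr : List (List (String × String))) (batch_size : Int) (include_skips : Bool) : List (List (List (String × String))) :=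
  let rows := itr.filter (fun row => include_skips || !pvHasSkip row)
  pvChunks ((max batch_size 1).toNat - 1) rows

-- ===== PRECONDITION & SPEC =====
def Spec_batcher (itr : List (List (String × String))) (batch_size : Int) (include_skips : Bool) (out : List (List (List (String × String)))) : Prop := out = batcher_alt itr batch_size include_skips
instance (itr : List (List (String × String))) (batch_size : Int) (include_skips : Bool) (out : List (List (List (String × String)))) : Decidable (Spec_batcher itr batch_size include_skips out) := by unfold Spec_batcher; infer_instance

-- ===== CLAIM (what is proved, stated in full; the proofs are below) =====
def Claim_equal_batcher : Prop := ∀ (itr : List (List (String × String))) (batch_size : Int) (include_skips : Bool), Dom_batcher itr batch_size include_skips → Spec_batcher itr batch_size include_skips (batcher itr batch_size include_skips)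

-- ===== LEMMAS AND PROOFS =====

theorem pvChunks_nil (m : Nat) : pvChunks m [] = [] := by
  rw [pvChunks.eq_def]

theorem pvChunks_cons (m : Nat) (r : List (String × String)) (rest : List (List (String × String))) :
    pvChunks m (r :: rest) = ((r :: rest).take (m + 1)) :: pvChunks m ((r :: rest).drop (m + 1)) := by
  rw [pvChunks.eq_def]

-- A's loop body applied over the raw list equals the skip-free body over the filtered list.
theorem batcher_foldl_filter (include_skips : Bool)
    (core : List (List (String × String)) × List (List (List (String × String))) → List (String × String) → List (List (String × String)) × List (List (List (String × String))))
    (l : List (List (String × String))) (st : List (List (String × String)) × List (List (List (String × String)))) :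
    l.foldl (fun st row => if !include_skips && pvHasSkip row then st else core st row) st
      = (l.filter (fun row => include_skips || !pvHasSkip row)).foldl core st := by
  induction l generalizing st with
  | nil => rfl
  | cons r t ih =>
    simp only [List.foldl_cons, List.filter_cons]
    cases hc : (!include_skips && pvHasSkip r) with
    | true =>
      have hp : (include_skips || !pvHasSkip r) = false := by
        cases include_skips <;> cases hs : pvHasSkip r <;> simp_all
      simp only [hc, hp, if_true, Bool.false_eq_true, if_false]
      exact ih st
    | false =>
      have hp : (include_skips || !pvHasSkip r) = true := by
        cases include_skips <;> cases hs : pvHasSkip r <;> simp_all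
      simp only [hc, hp, if_true, Bool.false_eq_true, if_false, List.foldl_cons]
      exact ih (core st r)

-- Invariant of A's accumulator loop: with a partial batch of length ≤ m in hand,
-- finishing the loop and flushing yields `out` followed by the (m+1)-chunks of batch ++ l.
theorem batcher_core_chunks (batch_size : Int) (m : Nat)
    (hm : (max batch_size 1).toNat = m + 1) :
    ∀ (l batch : List (List (String × String))) (out : List (List (List (String × String)))),
    batch.length ≤ m →
    (let st := l.foldl
        (fun (st : List (List (String × String)) × List (List (List (String × String)))) row =>
          let b := st.1 ++ [row]
          if (b.length : Int) ≥ batch_size then ([], st.2 ++ [b]) else (b, st.2))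
        (batch, out)
     if st.1.length ≠ 0 then st.2 ++ [st.1] else st.2)
      = out ++ pvChunks m (batch ++ l) := by
  intro l
  induction l with
  | nil =>
    intro batch out hb
    cases batch with
    | nil => simp [pvChunks_nil]
    | cons b bs =>
      simp only [List.foldl_nil, List.append_nil]
      rw [pvChunks_cons]
      have h1 : (b :: bs).take (m + 1) = b :: bs :=
        List.take_of_length_le (by simpa using Nat.le_succ_of_le hb)
      have h2 : (b :: bs).drop (m + 1) = [] :=
        List.drop_eq_nil_of_le (by simpa using Nat.le_succ_of_le hb)
      simp [h1, h2, pvChunks_nil]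
  | cons r t ih =>
    intro batch out hb
    simp only [List.foldl_cons]
    by_cases hfull : batch.length = m
    · have hcond : ((batch ++ [r]).length : Int) ≥ batch_size := by
        simp only [List.length_append, List.length_cons, List.length_nil]
        omega
      rw [if_pos hcond]
      have hrec := ih [] (out ++ [batch ++ [r]]) (Nat.zero_le m)
      simp only [List.nil_append] at hrec
      rw [hrec]
      have hba : batch ++ r :: t = (batch ++ [r]) ++ t := by simp
      obtain ⟨b, bs, hbr⟩ : ∃ b bs, batch ++ [r] = b :: bs := by
        cases h : batch ++ [r] with
        | nil => simp at h
        | cons b bs => exact ⟨b, bs, rfl⟩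
      have hlen : (b :: bs).length = m + 1 := by
        rw [← hbr]; simp [hfull]
      have h1 : List.take (m + 1) (b :: (bs ++ t)) = b :: bs := by
        have := List.take_left (l₁ := b :: bs) (l₂ := t)
        simpa [hlen] using this
      have h2 : List.drop (m + 1) (b :: (bs ++ t)) = t := by
        have := List.drop_left (l₁ := b :: bs) (l₂ := t)
        simpa [hlen] using this
      rw [hba, hbr, List.cons_append, pvChunks_cons]
      simp [h1, h2]
    · have hlt : batch.length < m := lt_of_le_of_ne hb hfull
      have hcond : ¬ (((batch ++ [r]).length : Int) ≥ batch_size) := by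
        simp only [List.length_append, List.length_cons, List.length_nil]
        omega
      rw [if_neg hcond]
      have hrec := ih (batch ++ [r]) out
        (by simp only [List.length_append, List.length_cons, List.length_nil]; omega)
      rw [hrec]
      simp

-- ===== VERDICT (by name: the statement is the Claim_ definition above) =====
theorem batcher_spec : Claim_equal_batcher := by
  intro itr batch_size include_skips _
  unfold Spec_batcher batcher batcher_alt
  have hm : (max batch_size 1).toNat = ((max batch_size 1).toNat - 1) + 1 := by omega
  rw [batcher_foldl_filter include_skips
        (fun st row =>
          let b := st.1 ++ [row]
          if (b.length : Int) ≥ batch_size then ([], st.2 ++ [b]) else (b, st.2))]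
  have hmain := batcher_core_chunks batch_size ((max batch_size 1).toNat - 1) hm
    (itr.filter (fun row => include_skips || !pvHasSkip row)) [] []
  simpa using hmain (Nat.zero_le _)
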